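-- pv_equiv track=rewrite | github.com/sangwani-coder/alx-interview | 0x0A-primegame/0-prime_game.py | playPrime
-- ===== SOURCE A (Python) =====
-- def playPrime(n):
--     """ initiates play"""
--     turn = 0
--     nums = []
--     for i in range(1, n + 1):
--         nums.append(i)
--     for j in nums[:]:
--         # first move maria
--         if turn == 0 and j == 2:
--             turn += 1
--             for i in nums[:]:
--                 if i % j == 0:
--                     nums.remove(i)
--         elif turn == 0 and j > 2:
--             # marias turn
--             if j % 2 != 0:
--                 for i in nums[:]:
--                     if i % j == 0:
--                         nums.remove(i)
--                         turn += 1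
--         elif turn == 1:
--             # bens turn
--             if j % 2 != 0:
--                 for i in nums[:]:
--                     if i % j == 0:
--                         nums.remove(i)
--                         turn -= 1
--     if turn == 0:
--         return 'Ben'
--     if turn == 1:
--         return 'Maria'
--     else:
--         return None
-- ===== SOURCE B (Python) =====
-- def playPrime(n):
--     """ initiates play"""
--     turn = 0
--     present = set(range(1, n + 1))
--     if n >= 2:
--         turn = 1
--         for m in range(2, n + 1, 2):
--             present.discard(m)
--     for j in range(3, n + 1, 2):
--         if turn == 0:
--             for m in range(j, n + 1, j):
--                 if m in present:
--                     present.remove(m)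
--                     turn += 1
--         elif turn == 1:
--             for m in range(j, n + 1, j):
--                 if m in present:
--                     present.remove(m)
--                     turn -= 1
--     if turn == 0:
--         return 'Ben'
--     if turn == 1:
--         return 'Maria'
--     return None
-- ===== Notes on version B (the rewrite author's own statement) =====
-- stated objective: faster
-- what changed: B keeps the live numbers in a set and, for each acting divisor, iterates directly over its multiples (sieve style) instead of A's full divisibility scan of a shrinking list with a linear-time list.remove per deletion; B also skips the divisors that are provably no-ops in A (the first one and the even ones past the opening move).
import Mathlib
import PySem

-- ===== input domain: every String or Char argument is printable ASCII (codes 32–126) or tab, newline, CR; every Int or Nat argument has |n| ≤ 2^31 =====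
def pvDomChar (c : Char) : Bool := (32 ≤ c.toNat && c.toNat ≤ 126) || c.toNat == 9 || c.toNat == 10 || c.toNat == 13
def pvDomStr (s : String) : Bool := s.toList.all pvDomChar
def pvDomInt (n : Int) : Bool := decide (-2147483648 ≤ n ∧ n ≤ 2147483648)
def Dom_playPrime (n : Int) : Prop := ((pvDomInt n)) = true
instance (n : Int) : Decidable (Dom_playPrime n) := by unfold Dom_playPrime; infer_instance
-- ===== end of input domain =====

-- B keeps the live numbers in a set and iterates directly over each acting j's multiples
-- (skipping the j that are no-ops in A) instead of A's divisibility scan of a shrinking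
-- list with list.remove per deletion; objective: faster (measured).

-- ===== PORT A =====
-- inner loop of A's j == 2 branch: 'for i in nums[:]: if i % j == 0: nums.remove(i)'
def pvRemove2A (j : Int) (acc : List Int) (i : Int) : List Int :=
  if PySem.Int.mod i j = 0 then (PySem.List.remove? acc i).getD acc else acc

-- inner loop of A's odd branches: remove, and move turn by d per removal
def pvRemoveA (j d : Int) (q : Int × List Int) (i : Int) : Int × List Int :=
  if PySem.Int.mod i j = 0 then (q.1 + d, (PySem.List.remove? q.2 i).getD q.2) else q

-- one iteration of A's outer 'for j in nums[:]' loop, state (turn, nums)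
def pvStepA (st : Int × List Int) (j : Int) : Int × List Int :=
  if st.1 = 0 ∧ j = 2 then
    (st.1 + 1, st.2.foldl (pvRemove2A j) st.2)
  else if st.1 = 0 ∧ j > 2 then
    (if ¬ PySem.Int.mod j 2 = 0 then st.2.foldl (pvRemoveA j 1) st else st)
  else if st.1 = 1 then
    (if ¬ PySem.Int.mod j 2 = 0 then st.2.foldl (pvRemoveA j (-1)) st else st)
  else st

def playPrime (n : Int) : Option String :=
  let nums : List Int := (PySem.List.pyRange 1 (n+1) 1).foldl (fun acc i => acc ++ [i]) []
  let st := nums.foldl pvStepA (0, nums)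
  if st.1 = 0 then some "Ben" else if st.1 = 1 then some "Maria" else none

-- ===== PORT B =====
-- B's inner loop: walk the multiples of j, remove the present ones, move turn by d each
def pvRemoveB (d : Int) (q : Int × PySem.Set Int) (m : Int) : Int × PySem.Set Int :=
  if PySem.Set.contains q.2 m then (q.1 + d, (PySem.Set.remove? q.2 m).getD q.2) else q

-- one iteration of B's outer loop over the odd j ≥ 3
def pvStepB (n : Int) (st : Int × PySem.Set Int) (j : Int) : Int × PySem.Set Int :=
  if st.1 = 0 then (PySem.List.pyRange j (n+1) j).foldl (pvRemoveB 1) st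
  else if st.1 = 1 then (PySem.List.pyRange j (n+1) j).foldl (pvRemoveB (-1)) st
  else st

def playPrime_alt (n : Int) : Option String :=
  let present : PySem.Set Int := PySem.Set.ofList (PySem.List.pyRange 1 (n+1) 1)
  let st0 : Int × PySem.Set Int :=
    if n ≥ 2 then (1, (PySem.List.pyRange 2 (n+1) 2).foldl PySem.Set.discard present)
    else (0, present)
  let st := (PySem.List.pyRange 3 (n+1) 2).foldl (pvStepB n) st0
  if st.1 = 0 then some "Ben" else if st.1 = 1 then some "Maria" else none

-- ===== PRECONDITION & SPEC =====
def Spec_playPrime (n : Int) (out : Option String) : Prop := out = playPrime_alt n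
instance (n : Int) (out : Option String) : Decidable (Spec_playPrime n out) := by unfold Spec_playPrime; infer_instance

-- ===== CLAIM (what is proved, stated in full; the proofs are below) =====
def Claim_equal_playPrime : Prop := ∀ (n : Int), Dom_playPrime n → Spec_playPrime n (playPrime n)

-- ===== LEMMAS AND PROOFS =====

-- invariant carried through the outer loops: the live list has no duplicates and lives in [1, n]
def pvInv (n : Int) (L : List Int) : Prop := L.Nodup ∧ ∀ x ∈ L, 1 ≤ x ∧ x < n + 1

lemma pvRange_pos_nil {a b s : Int} (hs : 0 < s) (h : b ≤ a) :
    PySem.List.pyRange a b s = [] := by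
  rw [PySem.List.pyRange_of_pos a b hs]
  simp [show ¬ a < b by omega]

-- cons form of range(a, b, s) for positive step
lemma pvRange_pos_cons {a b s : Int} (hs : 0 < s) (h : a < b) :
    PySem.List.pyRange a b s = a :: PySem.List.pyRange (a + s) b s := by
  rw [PySem.List.pyRange_of_pos a b hs, PySem.List.pyRange_of_pos (a+s) b hs]
  have key : b - a + s - 1 = (b - a - 1) + 1 * s := by ring
  have h1 : (b - a + s - 1) / s = (b - a - 1) / s + 1 := by
    rw [key, Int.add_mul_ediv_right _ _ (by omega : s ≠ 0)]
  by_cases h2 : a + s < b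
  · have h3 : b - (a + s) + s - 1 = b - a - 1 := by ring
    simp only [if_pos h, if_pos h2, h1, h3]
    have hq : 0 ≤ (b - a - 1) / s := Int.ediv_nonneg (by omega) (by omega)
    have : ((b - a - 1) / s + 1).toNat = ((b - a - 1)/s).toNat + 1 := by omega
    rw [this, List.range_succ_eq_map]
    simp [List.map_map, Function.comp]
    intro k _
    ring
  · have hz : (b - a - 1) / s = 0 := Int.ediv_eq_zero_of_lt (by omega) (by omega)
    simp only [if_pos h, if_neg h2, h1, hz]
    norm_num

lemma pvNodup_pyRange_pos {a b s : Int} (hs : 0 < s) : (PySem.List.pyRange a b s).Nodup := by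
  rw [PySem.List.pyRange_of_pos a b hs]
  refine List.Nodup.map ?_ (List.nodup_range)
  intro k1 k2 he
  simp only at he
  have : (k1 : Int) = k2 := by nlinarith [he]
  exact_mod_cast this

-- membership in the multiples range is exactly Python's 'x % j == 0' for x in [1, n]
lemma pvMemMul {n j x : Int} (hj : 1 ≤ j) (hx1 : 1 ≤ x) (hxn : x < n + 1) :
    x ∈ PySem.List.pyRange j (n+1) j ↔ PySem.Int.mod x j = 0 := by
  rw [PySem.List.mem_pyRange_iff_of_pos (by omega), PySem.Int.mod_eq_zero_iff_dvd]
  constructor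
  · rintro ⟨h1, h2, h3⟩
    have h4 := Dvd.dvd.add h3 (dvd_refl j)
    simpa using h4
  · intro hd
    refine ⟨Int.le_of_dvd (by omega) hd, hxn, ?_⟩
    exact dvd_sub hd dvd_rfl

lemma pvRemoveGetD {acc : List Int} {i : Int} (hnd : acc.Nodup) (hi : i ∈ acc) :
    (PySem.List.remove? acc i).getD acc = acc.filter (fun x => x != i) := by
  rw [PySem.List.remove?_eq_some_erase acc i hi, Option.getD_some, List.Nodup.erase_eq_filter hnd]

-- A's inner loop (list-only form, j == 2 branch) computes a filter
lemma pvInnerA2 (j : Int) : ∀ (l acc : List Int), acc.Nodup → l.Nodup → (∀ x ∈ l, x ∈ acc) →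
    l.foldl (pvRemove2A j) acc
      = acc.filter (fun x => decide (¬ (PySem.Int.mod x j = 0 ∧ x ∈ l))) := by
  intro l
  induction l with
  | nil => intro acc _ _ _; simp
  | cons i l' ih =>
    intro acc hacc hl hmem
    have hil' : i ∉ l' := (List.nodup_cons.mp hl).1
    simp only [List.foldl_cons, pvRemove2A]
    by_cases hp : PySem.Int.mod i j = 0
    · rw [if_pos hp, pvRemoveGetD hacc (hmem i List.mem_cons_self)]
      rw [ih _ (hacc.filter _) (List.nodup_cons.mp hl).2
        (fun x hx => List.mem_filter.mpr ⟨hmem x (List.mem_cons_of_mem _ hx),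
          by simp [ne_of_mem_of_not_mem hx hil']⟩)]
      rw [List.filter_filter]
      apply List.filter_congr
      intro x _
      by_cases hxi : x = i
      · subst hxi; simp [hp]
      · simp [hxi, List.mem_cons]
    · rw [if_neg hp]
      rw [ih _ hacc (List.nodup_cons.mp hl).2 (fun x hx => hmem x (List.mem_cons_of_mem _ hx))]
      apply List.filter_congr
      intro x _
      by_cases hxi : x = i
      · subst hxi; simp [hp]
      · simp [hxi, List.mem_cons]

-- A's inner loop with the turn counter: a filter plus d times the number of removals
lemma pvInnerA (j d : Int) : ∀ (l acc : List Int) (t : Int), acc.Nodup → l.Nodup →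
    (∀ x ∈ l, x ∈ acc) →
    l.foldl (pvRemoveA j d) (t, acc)
      = (t + d * l.countP (fun i => decide (PySem.Int.mod i j = 0)),
         acc.filter (fun x => decide (¬ (PySem.Int.mod x j = 0 ∧ x ∈ l)))) := by
  intro l
  induction l with
  | nil => intro acc t _ _ _; simp
  | cons i l' ih =>
    intro acc t hacc hl hmem
    have hil' : i ∉ l' := (List.nodup_cons.mp hl).1
    simp only [List.foldl_cons, pvRemoveA, List.countP_cons]
    by_cases hp : PySem.Int.mod i j = 0
    · rw [if_pos hp, pvRemoveGetD hacc (hmem i List.mem_cons_self)]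
      rw [ih _ _ (hacc.filter _) (List.nodup_cons.mp hl).2
        (fun x hx => List.mem_filter.mpr ⟨hmem x (List.mem_cons_of_mem _ hx),
          by simp [ne_of_mem_of_not_mem hx hil']⟩)]
      rw [Prod.mk.injEq]
      refine ⟨?_, ?_⟩
      · simp only [hp, decide_true]
        push_cast
        ring
      · rw [List.filter_filter]
        apply List.filter_congr
        intro x _
        by_cases hxi : x = i
        · subst hxi; simp [hp]
        · simp [hxi, List.mem_cons]
    · rw [if_neg hp]
      rw [ih _ _ hacc (List.nodup_cons.mp hl).2 (fun x hx => hmem x (List.mem_cons_of_mem _ hx))]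
      rw [Prod.mk.injEq]
      refine ⟨?_, ?_⟩
      · simp [hp]
      · apply List.filter_congr
        intro x _
        by_cases hxi : x = i
        · subst hxi; simp [hp]
        · simp [hxi, List.mem_cons]

lemma pvCountCons {m : Int} {M s : List Int} (hm : m ∉ M) (hs : s.Nodup) (hms : m ∈ s) :
    s.countP (fun x => decide (x ∈ m :: M)) = s.countP (fun x => decide (x ∈ M)) + 1 := by
  induction s with
  | nil => simp at hms
  | cons a s' ih =>
    have hsa : a ∉ s' := (List.nodup_cons.mp hs).1
    simp only [List.countP_cons]
    by_cases ham : a = m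
    · subst ham
      have h1 : s'.countP (fun x => decide (x ∈ a :: M)) = s'.countP (fun x => decide (x ∈ M)) := by
        apply List.countP_congr
        intro x hx
        have hxa : x ≠ a := ne_of_mem_of_not_mem hx hsa
        simp [List.mem_cons, hxa]
      rw [h1]
      simp [hm]
    · have hm' : m ∈ s' := by
        rcases List.mem_cons.mp hms with h | h
        · exact absurd h.symm ham
        · exact h
      rw [ih (List.nodup_cons.mp hs).2 hm']
      have haM : (decide (a ∈ m :: M)) = (decide (a ∈ M)) := by
        simp [List.mem_cons, ham]
      rw [haM]
      omega

lemma pvCountConsNot {m : Int} {M s : List Int} (hms : m ∉ s) :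
    s.countP (fun x => decide (x ∈ m :: M)) = s.countP (fun x => decide (x ∈ M)) := by
  apply List.countP_congr
  intro x hx
  have hxm : x ≠ m := ne_of_mem_of_not_mem hx hms
  simp [List.mem_cons, hxm]

-- B's inner loop over an arbitrary duplicate-free candidate list M
lemma pvInnerB (d : Int) : ∀ (M s : List Int) (t : Int), M.Nodup → s.Nodup →
    M.foldl (pvRemoveB d) (t, s)
      = (t + d * s.countP (fun x => decide (x ∈ M)), s.filter (fun x => decide (x ∉ M))) := by
  intro M
  induction M with
  | nil => intro s t _ _; simp
  | cons m M' ih =>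
    intro s t hM hs
    have hmM : m ∉ M' := (List.nodup_cons.mp hM).1
    simp only [List.foldl_cons, pvRemoveB]
    by_cases hm : m ∈ s
    · rw [if_pos (by simpa [PySem.Set.contains_iff] using hm)]
      rw [PySem.Set.remove?_of_mem hm, Option.getD_some]
      have hdisc : PySem.Set.discard s m = s.filter (fun y => y != m) := by
        simp [PySem.Set.discard, bne]
      rw [hdisc, ih _ _ (List.nodup_cons.mp hM).2 (hs.filter _)]
      rw [Prod.mk.injEq]
      refine ⟨?_, ?_⟩
      · rw [List.countP_filter]
        have h2 : s.countP (fun a => decide (a ∈ M') && (a != m))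
            = s.countP (fun x => decide (x ∈ M')) := by
          apply List.countP_congr
          intro x hx
          by_cases hxm : x = m
          · subst hxm; simp [hmM]
          · simp [hxm]
        rw [h2, pvCountCons hmM hs hm]
        push_cast
        ring
      · rw [List.filter_filter]
        apply List.filter_congr
        intro x _
        by_cases hxm : x = m
        · subst hxm; simp
        · simp [hxm, List.mem_cons]
    · rw [if_neg (by simpa [PySem.Set.contains_iff] using hm)]
      rw [ih _ _ (List.nodup_cons.mp hM).2 hs, pvCountConsNot hm]
      rw [Prod.mk.injEq]
      refine ⟨rfl, ?_⟩
      apply List.filter_congr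
      intro x hx
      have hxm : x ≠ m := ne_of_mem_of_not_mem hx hm
      simp [List.mem_cons, hxm]

-- B's even-removal loop (set.discard over a range) is a filter
lemma pvDiscardFold : ∀ (M s : List Int),
    M.foldl PySem.Set.discard s = s.filter (fun x => decide (x ∉ M)) := by
  intro M
  induction M with
  | nil => intro s; simp
  | cons m M' ih =>
    intro s
    simp only [List.foldl_cons]
    have hdisc : PySem.Set.discard s m = s.filter (fun y => y != m) := by
      simp [PySem.Set.discard, bne]
    rw [hdisc, ih, List.filter_filter]
    apply List.filter_congr
    intro x _
    by_cases hxm : x = m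
    · subst hxm; simp
    · simp [hxm, List.mem_cons]

-- the two inner loops agree, started on the same live list
lemma pvInnerEq (n j d : Int) (hj : 1 ≤ j) (L : List Int) (t : Int) (hI : pvInv n L) :
    L.foldl (pvRemoveA j d) (t, L) = (PySem.List.pyRange j (n+1) j).foldl (pvRemoveB d) (t, L) := by
  rw [pvInnerA j d L L t hI.1 hI.1 (fun _ hx => hx),
      pvInnerB d (PySem.List.pyRange j (n+1) j) L t (pvNodup_pyRange_pos (by omega)) hI.1]
  rw [Prod.mk.injEq]
  refine ⟨?_, ?_⟩
  · have hc : L.countP (fun i => decide (PySem.Int.mod i j = 0))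
        = L.countP (fun x => decide (x ∈ PySem.List.pyRange j (n+1) j)) := by
      apply List.countP_congr
      intro x hx
      obtain ⟨h1, h2⟩ := hI.2 x hx
      simp [pvMemMul hj h1 h2]
    rw [hc]
  · apply List.filter_congr
    intro x hx
    obtain ⟨h1, h2⟩ := hI.2 x hx
    simp [pvMemMul hj h1 h2, hx]

-- A's outer step is the identity at even j ≥ 3
lemma pvStepA_even {j : Int} (st : Int × List Int) (h3 : 3 ≤ j) (he : PySem.Int.mod j 2 = 0) :
    pvStepA st j = st := by
  have he' : j % 2 = 0 := by
    rw [← PySem.Int.mod_eq_emod_of_pos (by norm_num : (0:Int) < 2)]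
    exact he
  simp [pvStepA, show j ≠ 2 by omega, show ¬ j % 2 = 1 by omega]

-- A's outer step at j = 1 with turn = 0 does nothing
lemma pvStepA_one (L : List Int) : pvStepA (0, L) 1 = (0, L) := by
  norm_num [pvStepA]

-- the outer steps agree at odd j ≥ 3
lemma pvStepEq (n j : Int) (h3 : 3 ≤ j) (ho : ¬ PySem.Int.mod j 2 = 0) (t : Int) (L : List Int)
    (hI : pvInv n L) : pvStepA (t, L) j = pvStepB n (t, L) j := by
  have hj2 : j ≠ 2 := by omega
  simp only [pvStepA, pvStepB]
  split_ifs <;>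
    first
      | rfl
      | exact pvInnerEq n j 1 (by omega) L t hI
      | exact pvInnerEq n j (-1) (by omega) L t hI
      | omega

-- A's outer step keeps the invariant
lemma pvStepA_inv (n j : Int) (t : Int) (L : List Int) (hI : pvInv n L) :
    pvInv n (pvStepA (t, L) j).2 := by
  have hfil : ∀ (f : Int → Bool), pvInv n (L.filter f) :=
    fun f => ⟨hI.1.filter f, fun x hx => hI.2 x (List.mem_of_mem_filter hx)⟩
  simp only [pvStepA]
  split_ifs <;> (try dsimp only) <;>
    first
      | exact hI
      | (rw [pvInnerA2 j L L hI.1 hI.1 (fun _ hx => hx)]; exact hfil _)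
      | (rw [pvInnerA j 1 L L t hI.1 hI.1 (fun _ hx => hx)]; exact hfil _)
      | (rw [pvInnerA j (-1) L L t hI.1 hI.1 (fun _ hx => hx)]; exact hfil _)

-- the tails of the two outer loops agree from any odd a ≥ 3
lemma pvOuter (n : Int) : ∀ (k : Nat) (a t : Int) (L : List Int), (n + 1 - a).toNat ≤ k →
    3 ≤ a → a % 2 = 1 → pvInv n L →
    (PySem.List.pyRange a (n+1) 1).foldl pvStepA (t, L)
      = (PySem.List.pyRange a (n+1) 2).foldl (pvStepB n) (t, L) := by
  intro k
  induction k with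
  | zero =>
    intro a t L hk h3 hodd hI
    have hba : n + 1 ≤ a := by omega
    rw [pvRange_pos_nil one_pos hba, pvRange_pos_nil (by norm_num) hba]
    rfl
  | succ k ih =>
    intro a t L hk h3 hodd hI
    by_cases hba : n + 1 ≤ a
    · rw [pvRange_pos_nil one_pos hba, pvRange_pos_nil (by norm_num) hba]
      rfl
    · have hab : a < n + 1 := by omega
      rw [pvRange_pos_cons one_pos hab, pvRange_pos_cons (by norm_num : (0:Int) < 2) hab]
      simp only [List.foldl_cons]
      have hmod : ¬ PySem.Int.mod a 2 = 0 := by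
        rw [PySem.Int.mod_eq_emod_of_pos (by norm_num)]; omega
      rcases hA : pvStepA (t, L) a with ⟨t', L'⟩
      have hstep : pvStepB n (t, L) a = (t', L') := by
        rw [← pvStepEq n a h3 hmod t L hI, hA]
      rw [hstep]
      have hI' : pvInv n L' := by
        have h := pvStepA_inv n a t L hI
        rw [hA] at h; exact h
      by_cases hba2 : n + 1 ≤ a + 1
      · rw [pvRange_pos_nil one_pos hba2, pvRange_pos_nil (by norm_num) (by omega)]
        rfl
      · rw [pvRange_pos_cons one_pos (by omega : a + 1 < n + 1)]
        simp only [List.foldl_cons]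
        rw [pvStepA_even (t', L') (by omega)
          (by rw [PySem.Int.mod_eq_emod_of_pos (by norm_num)]; omega)]
        rw [show a + 1 + 1 = a + 2 by ring]
        exact ih (a + 2) t' L' (by omega) (by omega) (by omega) hI'

-- ===== VERDICT (by name: the statement is the Claim_ definition above) =====
theorem playPrime_spec : Claim_equal_playPrime := by
  intro n _
  unfold Spec_playPrime playPrime playPrime_alt
  simp only [PySem.List.foldl_append_singleton, List.nil_append]
  rw [PySem.Set.ofList_eq_self_of_nodup _ (PySem.List.nodup_pyRange_one 1 (n+1))]
  by_cases h2 : 2 ≤ n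
  · rw [if_pos (show n ≥ 2 by omega)]
    have hNnodup : (PySem.List.pyRange 1 (n+1) 1).Nodup := PySem.List.nodup_pyRange_one 1 (n+1)
    have hNmem : ∀ x ∈ PySem.List.pyRange 1 (n+1) 1, 1 ≤ x ∧ x < n + 1 := by
      intro x hx
      rw [PySem.List.mem_pyRange_one] at hx
      omega
    -- the common state after A has processed j = 1 and j = 2 / B its initialisation
    set E := (PySem.List.pyRange 1 (n+1) 1).filter
        (fun x => decide (¬ PySem.Int.mod x 2 = 0)) with hE
    have hIE : pvInv n E := ⟨hNnodup.filter _, fun x hx => hNmem x (List.mem_of_mem_filter hx)⟩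
    have e1 : PySem.List.pyRange 1 (n+1) 1 = 1 :: PySem.List.pyRange 2 (n+1) 1 := by
      have h := pvRange_pos_cons (a := 1) (b := n+1) (s := 1) one_pos (by omega)
      norm_num at h
      exact h
    have e2 : PySem.List.pyRange 2 (n+1) 1 = 2 :: PySem.List.pyRange 3 (n+1) 1 := by
      have h := pvRange_pos_cons (a := 2) (b := n+1) (s := 1) one_pos (by omega)
      norm_num at h
      exact h
    have hA2 : pvStepA (0, PySem.List.pyRange 1 (n+1) 1) 2 = (1, E) := by
      unfold pvStepA
      dsimp only
      rw [if_pos (⟨rfl, rfl⟩ : (0:Int) = 0 ∧ (2:Int) = 2)]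
      rw [pvInnerA2 2 _ _ hNnodup hNnodup (fun _ hx => hx)]
      rw [Prod.mk.injEq]
      refine ⟨by norm_num, ?_⟩
      rw [hE]
      apply List.filter_congr
      intro x hx
      simp [hx]
    have hB0 : (PySem.List.pyRange 2 (n+1) 2).foldl PySem.Set.discard
        (PySem.List.pyRange 1 (n+1) 1) = E := by
      rw [pvDiscardFold, hE]
      apply List.filter_congr
      intro x hx
      obtain ⟨hx1, hx2⟩ := hNmem x hx
      simp [pvMemMul (by norm_num : (1:Int) ≤ 2) hx1 hx2]
    rw [e1, e2] at hA2 hB0 ⊢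
    simp only [List.foldl_cons]
    simp only [pvStepA_one, hA2, hB0,
        pvOuter n (n + 1 - 3).toNat 3 1 E le_rfl (by norm_num) (by norm_num) hIE]
  · rw [if_neg (show ¬ n ≥ 2 by omega)]
    by_cases h1 : n ≤ 0
    · rw [pvRange_pos_nil one_pos (by omega),
          pvRange_pos_nil (by norm_num : (0:Int) < 2) (by omega)]
      rfl
    · have hn1 : n = 1 := by omega
      subst hn1
      decide
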